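-- pv_equiv track=rewrite | github.com/AJBats/saturn-daytona-usa-re | workstreams/car_flip_benchmark/circuit_memdiff.py | diff_regions
-- ===== SOURCE A (Python) =====
-- def diff_regions(before, after, base_addr, symbols=None):
--     """Find all byte differences between two memory snapshots."""
--     changes = []
--     for i in range(min(len(before), len(after))):
--         if before[i] != after[i]:
--             addr = base_addr + i
--             sym = ""
--             if symbols:
--                 # Check if this address has a symbol name
--                 from bisect import bisect_right
--                 addrs = sorted(symbols.keys())
--                 idx = bisect_right(addrs, addr) - 1
--                 if idx >= 0 and addr - addrs[idx] < 64:
--                     sym = f" ({symbols[addrs[idx]]}+0x{addr-addrs[idx]:X})"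
--             changes.append((addr, before[i], after[i], sym))
--     return changes
-- ===== SOURCE B (Python) =====
-- def diff_regions(before, after, base_addr, symbols=None):
--     """Find all byte differences between two memory snapshots."""
--     n = min(len(before), len(after))
--     changes = []
--     if symbols:
--         # Sort the symbol addresses ONCE, then annotate with a single merge
--         # sweep: diff addresses come out in ascending order, so a pointer j
--         # into addrs replaces the per-diff bisect.
--         addrs = sorted(symbols)
--         j = -1
--         for i in range(n):
--             if before[i] != after[i]:
--                 addr = base_addr + i
--                 while j + 1 < len(addrs) and addrs[j + 1] <= addr:
--                     j += 1
--                 sym = ""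
--                 if j >= 0 and addr - addrs[j] < 64:
--                     sym = " ({}+0x{:X})".format(symbols[addrs[j]], addr - addrs[j])
--                 changes.append((addr, before[i], after[i], sym))
--     else:
--         for i in range(n):
--             if before[i] != after[i]:
--                 changes.append((base_addr + i, before[i], after[i], ""))
--     return changes
-- ===== Notes on version B (the rewrite author's own statement) =====
-- stated objective: faster
-- what changed: Instead of re-sorting the symbol table and running a bisect for every differing byte, B sorts the symbol addresses once and annotates all diffs (which arrive in ascending address order) with a single monotone merge-sweep pointer.
import Mathlib
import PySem

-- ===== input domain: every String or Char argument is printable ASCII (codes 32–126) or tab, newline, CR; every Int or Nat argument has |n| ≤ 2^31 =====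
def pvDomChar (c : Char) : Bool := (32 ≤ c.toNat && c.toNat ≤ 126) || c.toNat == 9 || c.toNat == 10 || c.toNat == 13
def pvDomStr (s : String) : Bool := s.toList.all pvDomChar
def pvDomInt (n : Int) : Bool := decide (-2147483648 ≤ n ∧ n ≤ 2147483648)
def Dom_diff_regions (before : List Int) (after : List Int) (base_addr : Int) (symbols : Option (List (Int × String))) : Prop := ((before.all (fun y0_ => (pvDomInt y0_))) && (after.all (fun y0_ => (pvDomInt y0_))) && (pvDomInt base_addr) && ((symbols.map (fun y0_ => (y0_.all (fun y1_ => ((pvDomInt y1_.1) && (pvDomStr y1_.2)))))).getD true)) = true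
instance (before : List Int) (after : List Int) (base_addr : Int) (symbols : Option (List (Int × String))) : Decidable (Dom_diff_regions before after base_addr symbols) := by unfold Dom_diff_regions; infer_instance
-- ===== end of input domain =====

-- B replaces A's per-diff `sorted(symbols.keys())` + bisect by sorting the symbol
-- addresses once and annotating with a single monotone merge-sweep pointer (faster).

-- ===== shared formatting helper (f"{delta:X}" for 0 ≤ delta, used by both ports) =====
def pvHexDigit (n : Nat) : Char := if n < 10 then Char.ofNat (48 + n) else Char.ofNat (55 + n)

def pvHexUpAux (n : Nat) (acc : List Char) : List Char :=
  if n = 0 then acc else pvHexUpAux (n / 16) (pvHexDigit (n % 16) :: acc)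

-- uppercase hex of a nonnegative int, exactly f"{n:X}" for 0 ≤ n (both ports only
-- format deltas in [0, 64))
def pvHexUp (n : Nat) : String := if n = 0 then "0" else String.ofList (pvHexUpAux n [])

-- f" ({name}+0x{delta:X})"
def pvSymAnnot (name : String) (delta : Int) : String :=
  " (" ++ name ++ "+0x" ++ pvHexUp delta.toNat ++ ")"

-- ===== PORT A =====
-- A's inner `sym = …` block: sorts the dict keys and bisects on EVERY diff.
-- `if symbols:` — None and the empty dict are falsy; the dict argument (assoc list)
-- is decoded with PySem.Dict.ofList (Python dict(pairs): last value wins).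
def symLookupA (symbols : Option (List (Int × String))) (addr : Int) : String :=
  match symbols with
  | none => ""
  | some l =>
    if l.isEmpty then ""
    else
      let d := PySem.Dict.ofList l
      let addrs := PySem.List.sorted d.keys (fun x => x) false
      let idx : Int := (PySem.List.bisectRight addrs addr : Int) - 1
      if idx ≥ 0 ∧ addr - PySem.List.pyGetD addrs idx 0 < 64 then
        pvSymAnnot (d.getD (PySem.List.pyGetD addrs idx 0) "")
          (addr - PySem.List.pyGetD addrs idx 0)
      else ""

-- pyGetD is exact here: the loop index satisfies 0 ≤ i < min(len before, len after)
def diff_regions (before : List Int) (after : List Int) (base_addr : Int) (symbols : Option (List (Int × String))) : List (Int × Int × Int × String) :=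
  (PySem.List.pyRange 0 ((min before.length after.length : Nat) : Int) 1).foldl
    (fun changes i =>
      if PySem.List.pyGetD before i 0 ≠ PySem.List.pyGetD after i 0 then
        changes ++ [(base_addr + i, PySem.List.pyGetD before i 0,
          PySem.List.pyGetD after i 0, symLookupA symbols (base_addr + i))]
      else changes)
    []

-- ===== PORT B =====
-- Source B's `while j + 1 < len(addrs) and addrs[j+1] <= addr: j += 1`, with the
-- pointer carried as p = j + 1 : Nat (j starts at -1, so p starts at 0)
def advancePtr (addrs : List Int) (addr : Int) (p : Nat) : Nat :=
  if h : p < addrs.length then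
    if addrs[p] ≤ addr then advancePtr addrs addr (p + 1) else p
  else p
termination_by addrs.length - p

-- Source B's `sym = …` under the sweep: j = p - 1, guard `j >= 0 and addr - addrs[j] < 64`
def symLookupB (d : PySem.Dict Int String) (addrs : List Int) (addr : Int) (p : Nat) : String :=
  if (p : Int) - 1 ≥ 0 ∧ addr - PySem.List.pyGetD addrs ((p : Int) - 1) 0 < 64 then
    pvSymAnnot (d.getD (PySem.List.pyGetD addrs ((p : Int) - 1) 0) "")
      (addr - PySem.List.pyGetD addrs ((p : Int) - 1) 0)
  else ""

-- Source B's else-branch loop (no symbols): plain scan, empty annotation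
def plainDiffs (before : List Int) (after : List Int) (base_addr : Int) (n : Nat) : List (Int × Int × Int × String) :=
  (PySem.List.pyRange 0 (n : Int) 1).foldl
    (fun changes i =>
      if PySem.List.pyGetD before i 0 ≠ PySem.List.pyGetD after i 0 then
        changes ++ [(base_addr + i, PySem.List.pyGetD before i 0,
          PySem.List.pyGetD after i 0, "")]
      else changes)
    []

def diff_regions_alt (before : List Int) (after : List Int) (base_addr : Int) (symbols : Option (List (Int × String))) : List (Int × Int × Int × String) :=
  match symbols with
  | some l =>
    if l.isEmpty then plainDiffs before after base_addr (min before.length after.length)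
    else
      let d := PySem.Dict.ofList l
      let addrs := PySem.List.sorted d.keys (fun x => x) false
      ((PySem.List.pyRange 0 ((min before.length after.length : Nat) : Int) 1).foldl
        (fun (st : Nat × List (Int × Int × Int × String)) i =>
          if PySem.List.pyGetD before i 0 ≠ PySem.List.pyGetD after i 0 then
            (advancePtr addrs (base_addr + i) st.1,
             st.2 ++ [(base_addr + i, PySem.List.pyGetD before i 0,
               PySem.List.pyGetD after i 0,
               symLookupB d addrs (base_addr + i) (advancePtr addrs (base_addr + i) st.1))])
          else st)
        (0, [])).2
  | none => plainDiffs before after base_addr (min before.length after.length)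

-- ===== PRECONDITION & SPEC =====
def Spec_diff_regions (before : List Int) (after : List Int) (base_addr : Int) (symbols : Option (List (Int × String))) (out : List (Int × Int × Int × String)) : Prop := out = diff_regions_alt before after base_addr symbols
instance (before : List Int) (after : List Int) (base_addr : Int) (symbols : Option (List (Int × String))) (out : List (Int × Int × Int × String)) : Decidable (Spec_diff_regions before after base_addr symbols out) := by unfold Spec_diff_regions; infer_instance

-- ===== CLAIM (what is proved, stated in full; the proofs are below) =====
def Claim_equal_diff_regions : Prop := ∀ (before : List Int) (after : List Int) (base_addr : Int) (symbols : Option (List (Int × String))), Dom_diff_regions before after base_addr symbols → Spec_diff_regions before after base_addr symbols (diff_regions before after base_addr symbols)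

-- ===== LEMMAS AND PROOFS =====

-- once the pointer has swept past every earlier symbol address ≤ addr, it lands
-- exactly on bisect_right(addrs, addr)
theorem advancePtr_eq_bisectRight (addrs : List Int) (hs : addrs.Pairwise (· ≤ ·))
    (addr : Int) :
    ∀ (f p : Nat), addrs.length - p = f → p ≤ addrs.length →
      (∀ k (hk : k < addrs.length), k < p → addrs[k] ≤ addr) →
      advancePtr addrs addr p = PySem.List.bisectRight addrs addr := by
  obtain ⟨hle, hbelow, habove⟩ := PySem.List.bisectRight_spec addrs addr hs
  intro f
  induction f with
  | zero =>
    intro p hf hp hinv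
    have hpe : p = addrs.length := by omega
    have hcp : PySem.List.bisectRight addrs addr = p := by
      by_contra hne
      have hlt : PySem.List.bisectRight addrs addr < p := by omega
      have := habove (PySem.List.bisectRight addrs addr) (by omega) (le_refl _)
      have := hinv (PySem.List.bisectRight addrs addr) (by omega) hlt
      omega
    rw [hcp, advancePtr]
    simp [hpe]
  | succ m ih =>
    intro p hf hp hinv
    have hplt : p < addrs.length := by omega
    rw [advancePtr]
    simp only [hplt, dif_pos]
    by_cases hcase : addrs[p] ≤ addr
    · simp only [hcase, if_pos]
      have hpc : p < PySem.List.bisectRight addrs addr := by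
        by_contra hge
        have := habove p hplt (by omega)
        omega
      exact ih (p + 1) (by omega) (by omega)
        (fun k hk hkp => by
          by_cases hkp' : k < p
          · exact hinv k hk hkp'
          · have : k = p := by omega
            simpa [this] using hcase)
    · simp only [hcase, if_false]
      have hcp : PySem.List.bisectRight addrs addr ≤ p := by
        by_contra hgt
        exact hcase (hbelow p hplt (by omega))
      have hpc : p ≤ PySem.List.bisectRight addrs addr := by
        by_contra hlt
        have := habove (PySem.List.bisectRight addrs addr) (by omega) (le_refl _)
        have := hinv (PySem.List.bisectRight addrs addr) (by omega) (by omega)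
        omega
      omega

-- with the pointer at bisect_right(addrs, addr), the two annotation blocks agree
theorem symLookup_eq (l : List (Int × String)) (hne : l.isEmpty = false) (addr : Int) :
    symLookupA (some l) addr =
      symLookupB (PySem.Dict.ofList l)
        (PySem.List.sorted (PySem.Dict.ofList l).keys (fun x => x) false) addr
        (PySem.List.bisectRight
          (PySem.List.sorted (PySem.Dict.ofList l).keys (fun x => x) false) addr) := by
  simp only [symLookupA, symLookupB, hne, Bool.false_eq_true, if_false]

-- the merge-sweep loop of B computes A's loop: induction over the remaining range,
-- carrying the pointer invariant "every address left of p is ≤ every upcoming addr"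
theorem loop_eq (before after : List Int) (base_addr : Int) (l : List (Int × String))
    (hne : l.isEmpty = false)
    (addrs : List Int)
    (haddrs : addrs = PySem.List.sorted (PySem.Dict.ofList l).keys (fun x => x) false)
    (hs : addrs.Pairwise (· ≤ ·)) :
    ∀ (m : Nat) (t : Int) (p : Nat) (acc : List (Int × Int × Int × String)),
      p ≤ addrs.length →
      (∀ k (hk : k < addrs.length), k < p → addrs[k] ≤ base_addr + t) →
      ((PySem.List.pyRange t (t + (m : Int)) 1).foldl
        (fun (st : Nat × List (Int × Int × Int × String)) i =>
          if PySem.List.pyGetD before i 0 ≠ PySem.List.pyGetD after i 0 then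
            (advancePtr addrs (base_addr + i) st.1,
             st.2 ++ [(base_addr + i, PySem.List.pyGetD before i 0,
               PySem.List.pyGetD after i 0,
               symLookupB (PySem.Dict.ofList l) addrs (base_addr + i)
                 (advancePtr addrs (base_addr + i) st.1))])
          else st) (p, acc)).2
      = (PySem.List.pyRange t (t + (m : Int)) 1).foldl
          (fun changes i =>
            if PySem.List.pyGetD before i 0 ≠ PySem.List.pyGetD after i 0 then
              changes ++ [(base_addr + i, PySem.List.pyGetD before i 0,
                PySem.List.pyGetD after i 0, symLookupA (some l) (base_addr + i))]
            else changes) acc := by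
  intro m
  induction m with
  | zero =>
    intro t p acc hp hinv
    rw [show t + ((0 : Nat) : Int) = t by omega, PySem.List.pyRange_one_eq_nil (le_refl t)]
    simp
  | succ m ih =>
    intro t p acc hp hinv
    rw [PySem.List.pyRange_one_cons (by omega : t < t + ((m + 1 : Nat) : Int))]
    simp only [List.foldl_cons]
    have hshift : t + ((m + 1 : Nat) : Int) = (t + 1) + ((m : Nat) : Int) := by
      push_cast; ring
    rw [hshift]
    by_cases hdiff : PySem.List.pyGetD before t 0 ≠ PySem.List.pyGetD after t 0
    · simp only [hdiff, if_pos, ne_eq, not_false_eq_true]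
      have hadv : advancePtr addrs (base_addr + t) p
          = PySem.List.bisectRight addrs (base_addr + t) :=
        advancePtr_eq_bisectRight addrs hs (base_addr + t) (addrs.length - p) p rfl hp hinv
      have hsym : symLookupA (some l) (base_addr + t)
          = symLookupB (PySem.Dict.ofList l) addrs (base_addr + t)
            (PySem.List.bisectRight addrs (base_addr + t)) := by
        rw [haddrs]; exact symLookup_eq l hne (base_addr + t)
      rw [hadv, hsym]
      obtain ⟨hle, hbelow, _⟩ := PySem.List.bisectRight_spec addrs (base_addr + t) hs
      exact ih (t + 1) _ _ hle (fun k hk hkp => by have := hbelow k hk hkp; omega)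
    · simp only [ne_eq, not_not] at hdiff
      simp only [hdiff, ne_eq, not_true_eq_false, if_false]
      exact ih (t + 1) p acc hp (fun k hk hkp => by have := hinv k hk hkp; omega)

-- ===== VERDICT (by name: the statement is the Claim_ definition above) =====
theorem diff_regions_spec : Claim_equal_diff_regions := by
  intro before after base_addr symbols _
  show diff_regions before after base_addr symbols = diff_regions_alt before after base_addr symbols
  match symbols with
  | none =>
    simp [diff_regions, diff_regions_alt, plainDiffs, symLookupA]
  | some l =>
    by_cases hE : l.isEmpty
    · simp [diff_regions, diff_regions_alt, plainDiffs, symLookupA, hE]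
    · have hne : l.isEmpty = false := by simpa using hE
      have hs : (PySem.List.sorted (PySem.Dict.ofList l).keys (fun x => x) false).Pairwise (· ≤ ·) :=
        PySem.List.sorted_pairwise (PySem.Dict.ofList l).keys (fun x => x)
      have := loop_eq before after base_addr l hne _ rfl hs
        (min before.length after.length) 0 0 []
        (Nat.zero_le _) (by intro k hk h0; omega)
      simp only [zero_add] at this
      simp only [diff_regions, diff_regions_alt, hne, Bool.false_eq_true, if_false]
      exact this.symm
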